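-- pv_equiv track=rewrite | github.com/mehdidadah/scanzo-starter | core/parsing/rules/tva_vertical.py | _header_order
-- ===== SOURCE A (Python) =====
-- from typing import Optional, List, Tuple, Set
--
-- def _header_order(lines: List[str], i: int) -> List[str]:
--     """
--     Essaie d'inférer un ordre de labels sur 3-4 lignes autour de l'ancre.
--     Ex: ["Mt. TVA", "Base HT Base TTC"] -> ["TVA", "HT", "TTC"].
--     """
--     txt = " ".join(lines[max(0, i-2):min(len(lines), i+3)])
--     order: List[Tuple[int,str]] = []
--     for label, canon in [("Mt. TVA", "TVA"), ("Montant TVA", "TVA"), ("TVA", "TVA"),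
--                          ("Base HT", "HT"), ("HT", "HT"),
--                          ("Base TTC", "TTC"), ("TTC", "TTC")]:
--         pos = txt.lower().find(label.lower())
--         if pos != -1:
--             order.append((pos, canon))
--     order.sort(key=lambda x: x[0])
--     dedup: List[str] = []
--     for _, canon in order:
--         if canon not in dedup:
--             dedup.append(canon)
--     # on veut idéalement les trois
--     return dedup
-- ===== SOURCE B (Python) =====
-- def _header_order(lines, i):
--     txt = " ".join(lines[max(0, i-2):min(len(lines), i+3)]).lower()
--     mins = []
--     for canon, labels in (("TVA", ("mt. tva", "montant tva", "tva")),
--                           ("HT", ("base ht", "ht")),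
--                           ("TTC", ("base ttc", "ttc"))):
--         ps = [p for p in (txt.find(lab) for lab in labels) if p != -1]
--         if ps:
--             mins.append((min(ps), canon))
--     mins.sort(key=lambda t: t[0])
--     return [c for _, c in mins]
-- ===== Notes on version B (the rewrite author's own statement) =====
-- stated objective: alternative
-- what changed: B groups the labels per canonical name, takes one min find-position per canon, and sorts the at-most-3 (pos, canon) pairs, replacing A's global sort of all 7 hits followed by a separate dedup loop; B also lowercases the window text once instead of once per label.
import Mathlib
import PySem

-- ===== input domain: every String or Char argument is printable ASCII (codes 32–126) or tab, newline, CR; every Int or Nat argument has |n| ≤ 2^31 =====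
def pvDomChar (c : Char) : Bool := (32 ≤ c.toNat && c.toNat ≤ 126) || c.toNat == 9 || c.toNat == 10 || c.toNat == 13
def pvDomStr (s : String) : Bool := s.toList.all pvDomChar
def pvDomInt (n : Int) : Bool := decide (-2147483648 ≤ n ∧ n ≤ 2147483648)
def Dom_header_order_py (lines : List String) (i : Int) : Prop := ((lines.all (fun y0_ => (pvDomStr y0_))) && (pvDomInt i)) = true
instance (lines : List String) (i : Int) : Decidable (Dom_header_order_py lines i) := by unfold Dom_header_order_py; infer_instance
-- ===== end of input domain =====

-- B groups labels per canon and sorts the at-most-3 per-canon minima instead of sorting all 7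
-- hits and deduplicating; objective: alternative decomposition (and the text is lowered once).

-- ===== PORT A =====
def header_order_py (lines : List String) (i : Int) : List String :=
  let txt := PySem.Str.join " " (PySem.List.slice lines (some (max 0 (i - 2))) (some (min (lines.length : Int) (i + 3))))
  let order : List (Int × String) :=
    [("Mt. TVA", "TVA"), ("Montant TVA", "TVA"), ("TVA", "TVA"),
     ("Base HT", "HT"), ("HT", "HT"),
     ("Base TTC", "TTC"), ("TTC", "TTC")].foldl (fun acc lc =>
       let pos := PySem.Str.find (PySem.Str.lower txt) (PySem.Str.lower lc.1)
       if pos != -1 then acc ++ [(pos, lc.2)] else acc) []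
  let sortedOrder := PySem.List.sorted order (fun x => x.1) false
  sortedOrder.foldl (fun dedup pc => if dedup.contains pc.2 then dedup else dedup ++ [pc.2]) []

-- ===== PORT B =====
def header_order_py_alt (lines : List String) (i : Int) : List String :=
  let txt := PySem.Str.lower (PySem.Str.join " " (PySem.List.slice lines (some (max 0 (i - 2))) (some (min (lines.length : Int) (i + 3)))))
  let mins : List (Int × String) :=
    [("TVA", ["mt. tva", "montant tva", "tva"]),
     ("HT", ["base ht", "ht"]),
     ("TTC", ["base ttc", "ttc"])].foldl (fun acc g =>
       let ps := (g.2.map (fun lab => PySem.Str.find txt lab)).filter (fun p => p != -1)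
       match ps with
       | [] => acc
       | h :: t => acc ++ [(t.foldl min h, g.1)]) []
  (PySem.List.sorted mins (fun t => t.1) false).map (fun t => t.2)

-- ===== PRECONDITION & SPEC =====
def Spec_header_order_py (lines : List String) (i : Int) (out : List String) : Prop := out = header_order_py_alt lines i
instance (lines : List String) (i : Int) (out : List String) : Decidable (Spec_header_order_py lines i out) := by unfold Spec_header_order_py; infer_instance

-- ===== CLAIM (what is proved, stated in full; the proofs are below) =====
def Claim_equal_header_order_py : Prop := ∀ (lines : List String) (i : Int), Dom_header_order_py lines i → Spec_header_order_py lines i (header_order_py lines i)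

-- ===== LEMMAS AND PROOFS =====

-- A's dedup loop, as a structural recursion (equal to the foldl, lemma ded_eq_foldl).
def ded : List String → List (Int × String) → List String
  | acc, [] => acc
  | acc, pc :: t => ded (if pc.2 ∈ acc then acc else acc ++ [pc.2]) t

theorem ded_eq_foldl (l : List (Int × String)) (acc : List String) :
    l.foldl (fun d pc => if d.contains pc.2 then d else d ++ [pc.2]) acc = ded acc l := by
  induction l generalizing acc with
  | nil => rfl
  | cons a t ih =>
      simp only [List.foldl, ded]
      rw [show (if a.2 ∈ acc then acc else acc ++ [a.2]) = (if acc.contains a.2 then acc else acc ++ [a.2]) by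
        simp]
      exact ih _

-- stable insertion step / insertion sort, specialised to key = fst
def ins (x : Int × String) (s : List (Int × String)) : List (Int × String) :=
  PySem.List.insertBy (fun a b => decide (a.1 < b.1)) x s

def isort (l : List (Int × String)) : List (Int × String) :=
  l.foldl (fun acc x => ins x acc) []

theorem isort_eq (l : List (Int × String)) :
    PySem.List.sorted l (fun x => x.1) false = isort l :=
  PySem.List.sorted_eq_foldl_insertBy l (fun x => x.1)

theorem ins_nil (z : Int × String) : ins z [] = [z] := rfl

theorem ins_cons_of_lt (z a : Int × String) (t : List (Int × String)) (h : z.1 < a.1) :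
    ins z (a :: t) = z :: a :: t := by
  simp [ins, PySem.List.insertBy, h]

theorem ins_cons_of_not_lt (z a : Int × String) (t : List (Int × String)) (h : ¬ z.1 < a.1) :
    ins z (a :: t) = a :: ins z t := by
  simp [ins, PySem.List.insertBy, h]

theorem mem_ins {y z : Int × String} {s : List (Int × String)} :
    y ∈ ins z s ↔ y = z ∨ y ∈ s :=
  PySem.List.mem_insertBy _ _ _ _

theorem ins_append_of_not_lt (z : Int × String) (α r : List (Int × String))
    (h : ∀ a ∈ α, ¬ z.1 < a.1) : ins z (α ++ r) = α ++ ins z r := by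
  induction α with
  | nil => rfl
  | cons a t ih =>
      rw [List.cons_append, ins_cons_of_not_lt z a _ (h a (by simp)), ih (fun b hb => h b (by simp [hb])),
        List.cons_append]

theorem ins_append_cons_of_lt (z x : Int × String) (α β : List (Int × String))
    (h : z.1 < x.1) : ins z (α ++ x :: β) = ins z α ++ x :: β := by
  induction α with
  | nil => simp [ins_cons_of_lt z x β h, ins_nil]
  | cons a t ih =>
      by_cases ha : z.1 < a.1
      · rw [List.cons_append, ins_cons_of_lt z a _ ha, ins_cons_of_lt z a t ha]; rfl
      · rw [List.cons_append, ins_cons_of_not_lt z a _ ha, ins_cons_of_not_lt z a t ha, ih,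
          List.cons_append]

theorem ins_append_of_lt_all (z : Int × String) (α β : List (Int × String))
    (h : ∀ b ∈ β, z.1 < b.1) : ins z (α ++ β) = ins z α ++ β := by
  induction α with
  | nil =>
      cases β with
      | nil => rfl
      | cons b t => simp [ins_cons_of_lt z b t (h b (by simp)), ins_nil]
  | cons a t ih =>
      by_cases ha : z.1 < a.1
      · rw [List.cons_append, ins_cons_of_lt z a _ ha, ins_cons_of_lt z a t ha]; rfl
      · rw [List.cons_append, ins_cons_of_not_lt z a _ ha, ins_cons_of_not_lt z a t ha, ih,
          List.cons_append]

theorem mem_acc_step (c d : String) (acc : List String) (h : c ∈ acc ∨ c = d) :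
    c ∈ (if d ∈ acc then acc else acc ++ [d]) := by
  by_cases hd : d ∈ acc
  · rcases h with h | rfl
    · simp [hd, h]
    · simp [hd]
  · rcases h with h | rfl
    · simp [hd, h]
    · simp [hd]

theorem ded_middle (α : List (Int × String)) (x : Int × String) (β : List (Int × String))
    (acc : List String) (h : x.2 ∈ acc ∨ x.2 ∈ α.map Prod.snd) :
    ded acc (α ++ x :: β) = ded acc (α ++ β) := by
  induction α generalizing acc with
  | nil =>
      rcases h with h | h
      · show ded (if x.2 ∈ acc then acc else acc ++ [x.2]) β = ded acc β
        rw [if_pos h]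
      · simp at h
  | cons a t ih =>
      show ded (if a.2 ∈ acc then acc else acc ++ [a.2]) (t ++ x :: β)
         = ded (if a.2 ∈ acc then acc else acc ++ [a.2]) (t ++ β)
      apply ih
      rcases h with h | h
      · exact Or.inl (mem_acc_step _ _ _ (Or.inl h))
      · rcases (by simpa using h : x.2 = a.2 ∨ x.2 ∈ t.map Prod.snd) with h' | h'
        · exact Or.inl (mem_acc_step _ _ _ (Or.inr h'))
        · exact Or.inr h'

theorem aux_drop (q : List (Int × String)) (x : Int × String) :
    ∀ (α β : List (Int × String)),
    ((∃ y ∈ α, y.2 = x.2) ∨ (∃ y ∈ q, y.2 = x.2 ∧ y.1 < x.1)) →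
    (∀ a ∈ α, a.1 ≤ x.1) → (∀ b ∈ β, x.1 ≤ b.1) →
    ded [] (q.foldl (fun acc z => ins z acc) (α ++ x :: β)) =
      ded [] (q.foldl (fun acc z => ins z acc) (α ++ β)) := by
  induction q with
  | nil =>
      intro α β hy hα hβ
      rcases hy with ⟨y, hyα, hy2⟩ | ⟨y, hy, _⟩
      · exact ded_middle α x β []
          (Or.inr (by simpa [hy2] using List.mem_map_of_mem (f := Prod.snd) hyα))
      · simp at hy
  | cons z q ih =>
      intro α β hy hα hβ
      simp only [List.foldl]
      by_cases hz : z.1 < x.1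
      · rw [ins_append_cons_of_lt z x α β hz,
            ins_append_of_lt_all z α β (fun b hb => lt_of_lt_of_le hz (hβ b hb))]
        apply ih
        · rcases hy with ⟨y, hyα, hy2⟩ | ⟨y, hyq, hy2, hy1⟩
          · exact Or.inl ⟨y, mem_ins.mpr (Or.inr hyα), hy2⟩
          · rcases List.mem_cons.mp hyq with rfl | hyq'
            · exact Or.inl ⟨y, mem_ins.mpr (Or.inl rfl), hy2⟩
            · exact Or.inr ⟨y, hyq', hy2, hy1⟩
        · intro a ha
          rcases mem_ins.mp ha with rfl | ha'
          · exact le_of_lt hz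
          · exact hα a ha'
        · exact hβ
      · have hα' : ∀ a ∈ α, ¬ z.1 < a.1 := fun a ha => by
          have := hα a ha; omega
        rw [ins_append_of_not_lt z α _ hα', ins_cons_of_not_lt z x β hz,
            ins_append_of_not_lt z α _ hα']
        apply ih
        · rcases hy with ⟨y, hyα, hy2⟩ | ⟨y, hyq, hy2, hy1⟩
          · exact Or.inl ⟨y, hyα, hy2⟩
          · rcases List.mem_cons.mp hyq with rfl | hyq'
            · omega
            · exact Or.inr ⟨y, hyq', hy2, hy1⟩
        · exact hα
        · intro b hb
          rcases mem_ins.mp hb with rfl | hb'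
          · omega
          · exact hβ b hb'

theorem dropWhile_head_false {p : Int × String → Bool} :
    ∀ (s : List (Int × String)) (b : Int × String) (t : List (Int × String)),
    s.dropWhile p = b :: t → p b = false := by
  intro s
  induction s with
  | nil => intro b t h; simp [List.dropWhile] at h
  | cons a s ih =>
      intro b t h
      by_cases ha : p a
      · rw [List.dropWhile_cons_of_pos ha] at h; exact ih b t h
      · rw [List.dropWhile_cons_of_neg ha] at h
        cases h; simpa using ha

theorem ins_eq_takeWhile (x : Int × String) (s : List (Int × String)) :
    ins x s = s.takeWhile (fun a => !decide (x.1 < a.1)) ++ x :: s.dropWhile (fun a => !decide (x.1 < a.1)) := by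
  induction s with
  | nil => rfl
  | cons a t ih =>
      by_cases h : x.1 < a.1
      · rw [ins_cons_of_lt x a t h, List.takeWhile_cons, List.dropWhile_cons]
        simp [h]
      · rw [ins_cons_of_not_lt x a t h, List.takeWhile_cons, List.dropWhile_cons]
        simp only [h, decide_false, Bool.not_false, if_true]
        rw [ih]; rfl

-- dropping one redundant element: an x with an earlier same-canon element of key ≤ x.1,
-- or a later same-canon element of key < x.1, does not change A's sorted-then-dedup result
theorem drop_mid (p q : List (Int × String)) (x : Int × String)
    (h : (∃ y ∈ p, y.2 = x.2 ∧ y.1 ≤ x.1) ∨ (∃ y ∈ q, y.2 = x.2 ∧ y.1 < x.1)) :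
    ded [] (isort (p ++ x :: q)) = ded [] (isort (p ++ q)) := by
  have hsorted : (isort p).Pairwise (fun a b => a.1 ≤ b.1) := by
    rw [← isort_eq]
    exact PySem.List.sorted_pairwise p (fun a => a.1)
  set A := (isort p).takeWhile (fun a => !decide (x.1 < a.1)) with hA
  set B := (isort p).dropWhile (fun a => !decide (x.1 < a.1)) with hB
  have hsplit : isort p = A ++ B := (List.takeWhile_append_dropWhile).symm
  have hAle : ∀ a ∈ A, a.1 ≤ x.1 := by
    intro a ha
    have := List.mem_takeWhile_imp ha
    simp at this; omega
  have hBgt : ∀ b ∈ B, x.1 < b.1 := by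
    intro b hb
    rcases hbb : B with _ | ⟨b0, t⟩
    · rw [hbb] at hb; simp at hb
    · have hb0 : (fun a => !decide (x.1 < a.1)) b0 = false :=
        dropWhile_head_false (isort p) b0 t (hB ▸ hbb)
      simp at hb0
      have hpw : (b0 :: t).Pairwise (fun a b => a.1 ≤ b.1) := by
        rw [← hbb, hB]; exact hsorted.sublist (List.dropWhile_sublist _)
      rw [hbb] at hb
      rcases List.mem_cons.mp hb with rfl | hbt
      · exact hb0
      · have := (List.pairwise_cons.mp hpw).1 b hbt
        omega
  have e1 : isort (p ++ x :: q) = q.foldl (fun acc z => ins z acc) (A ++ x :: B) := by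
    unfold isort
    rw [List.foldl_append]
    show (x :: q).foldl (fun acc z => ins z acc) (isort p) = _
    simp only [List.foldl]
    congr 1
    rw [show ins x (isort p) = A ++ x :: B by rw [ins_eq_takeWhile, ← hA, ← hB]]
  have e2 : isort (p ++ q) = q.foldl (fun acc z => ins z acc) (A ++ B) := by
    unfold isort
    rw [List.foldl_append, ← hsplit]
    rfl
  rw [e1, e2]
  apply aux_drop
  · rcases h with ⟨y, hyp, hy2, hy1⟩ | h2
    · left
      have hyS : y ∈ isort p := by
        rw [← isort_eq]
        exact (PySem.List.mem_sorted (x := y) (xs := p) (key := fun a => a.1) (rev := false)).mpr hyp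
      rw [hsplit] at hyS
      rcases List.mem_append.mp hyS with hyA | hyB
      · exact ⟨y, hyA, hy2⟩
      · exact absurd (hBgt y hyB) (by omega)
    · exact Or.inr h2
  · exact hAle
  · exact fun b hb => le_of_lt (hBgt b hb)

-- group normal forms: one optional hit (A side), one optional per-canon minimum (B side)
def gIf (a : Int) (c : String) : List (Int × String) := if a != -1 then [(a, c)] else []

def gMin (ps : List Int) (c : String) : List (Int × String) :=
  match ps with
  | [] => []
  | h :: t => [(t.foldl min h, c)]

theorem pair_reduce (pre rest : List (Int × String)) (u v : Int) (c : String) :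
    ded [] (isort (pre ++ (u, c) :: (v, c) :: rest)) =
      ded [] (isort (pre ++ (min u v, c) :: rest)) := by
  by_cases h : u ≤ v
  · have hd := drop_mid (pre ++ [(u, c)]) rest (v, c)
      (Or.inl ⟨(u, c), by simp, rfl, h⟩)
    simp only [List.append_assoc, List.singleton_append] at hd
    rw [hd, show min u v = u by omega]
  · have hd := drop_mid pre ((v, c) :: rest) (u, c)
      (Or.inr ⟨(v, c), by simp, rfl, by omega⟩)
    rw [hd, show min u v = v by omega]

theorem red2 (pre rest : List (Int × String)) (b1 b2 : Int) (c : String) :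
    ded [] (isort (pre ++ (gIf b1 c ++ gIf b2 c) ++ rest)) =
      ded [] (isort (pre ++ gMin ([b1, b2].filter (fun p => p != -1)) c ++ rest)) := by
  by_cases h1 : b1 = -1 <;> by_cases h2 : b2 = -1
  · simp [gIf, gMin, h1, h2]
  · simp [gIf, gMin, h1, h2]
  · simp [gIf, gMin, h1, h2]
  · simp only [gIf, gMin, List.filter_cons, List.filter_nil, bne_iff_ne, ne_eq, h1, h2,
      not_false_iff, if_true, List.foldl_cons, List.foldl_nil,
      List.append_assoc, List.cons_append, List.nil_append]
    exact pair_reduce pre rest b1 b2 c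

theorem red3 (pre rest : List (Int × String)) (a1 a2 a3 : Int) (c : String) :
    ded [] (isort (pre ++ (gIf a1 c ++ gIf a2 c ++ gIf a3 c) ++ rest)) =
      ded [] (isort (pre ++ gMin ([a1, a2, a3].filter (fun p => p != -1)) c ++ rest)) := by
  have norm : ∀ (l : List (Int × String)) (u v : Int),
      ded [] (isort (pre ++ (u, c) :: (v, c) :: l)) = ded [] (isort (pre ++ (min u v, c) :: l)) := by
    intro l u v
    have := pair_reduce pre l u v c
    simpa only [List.append_assoc, List.singleton_append] using this
  by_cases h1 : a1 = -1 <;> by_cases h2 : a2 = -1 <;> by_cases h3 : a3 = -1 <;>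
    simp only [gIf, gMin, List.filter_cons, List.filter_nil, bne_iff_ne, ne_eq, h1, h2, h3,
      not_false_iff, if_true, if_false, List.foldl_cons, List.foldl_nil,
      List.append_assoc, List.cons_append, List.nil_append, bne_self_eq_false,
      Bool.false_eq_true]
  · exact norm rest a2 a3
  · exact norm rest a1 a3
  · exact norm rest a1 a2
  · have h23 := pair_reduce (pre ++ [(a1, c)]) rest a2 a3 c
    simp only [List.append_assoc, List.singleton_append] at h23
    rw [h23, norm rest a1 (min a2 a3), show min a1 (min a2 a3) = min (min a1 a2) a3 by omega]

theorem if_append_step {c : Bool} (acc : List (Int × String)) (x : Int × String) :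
    (if c then acc ++ [x] else acc) = acc ++ (if c then [x] else []) := by
  cases c <;> simp

theorem match_step (acc : List (Int × String)) (ps : List Int) (c : String) :
    (match ps with
     | [] => acc
     | h :: t => acc ++ [(t.foldl min h, c)]) = acc ++ gMin ps c := by
  cases ps <;> simp [gMin]

theorem map_snd_gMin (ps : List Int) (c : String) :
    (gMin ps c).map Prod.snd = if ps.isEmpty then [] else [c] := by
  cases ps <;> simp [gMin]

theorem ded_eq_map_snd : ∀ (s : List (Int × String)) (acc : List String),
    (∀ e ∈ s, e.2 ∉ acc) → (s.map Prod.snd).Nodup → ded acc s = acc ++ s.map Prod.snd := by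
  intro s
  induction s with
  | nil => intro acc _ _; simp [ded]
  | cons e t ih =>
      intro acc hacc hnd
      have hnd' : e.2 ∉ t.map Prod.snd ∧ (t.map Prod.snd).Nodup := by
        rw [List.map_cons] at hnd; exact List.nodup_cons.mp hnd
      show ded (if e.2 ∈ acc then acc else acc ++ [e.2]) t = acc ++ (e :: t).map Prod.snd
      rw [if_neg (hacc e (by simp))]
      rw [ih (acc ++ [e.2]) ?_ hnd'.2]
      · simp
      · intro f hf
        simp only [List.mem_append, List.mem_singleton]
        rintro (hin | heq)
        · exact hacc f (by simp [hf]) hin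
        · exact hnd'.1 (heq ▸ List.mem_map_of_mem (f := Prod.snd) hf)

theorem ded_isort_eq_map_snd (M : List (Int × String)) (h : (M.map Prod.snd).Nodup) :
    ded [] (isort M) = (isort M).map Prod.snd := by
  have hperm : (isort M).Perm M := by
    rw [← isort_eq]; exact PySem.List.sorted_perm M (fun x => x.1) false
  have : ((isort M).map Prod.snd).Nodup := (hperm.map Prod.snd).nodup_iff.mpr h
  simpa using ded_eq_map_snd (isort M) [] (by simp) this

theorem nodup_M (ps1 ps2 ps3 : List Int) :
    ((gMin ps1 "TVA" ++ (gMin ps2 "HT" ++ gMin ps3 "TTC")).map Prod.snd).Nodup := by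
  simp only [List.map_append, map_snd_gMin]
  split_ifs <;> simp

theorem gIf_def (a : Int) (c : String) : (if a != -1 then [(a, c)] else []) = gIf a c := rfl

-- ===== VERDICT (by name: the statement is the Claim_ definition above) =====
theorem header_order_py_spec : Claim_equal_header_order_py := by
  intro lines i _
  show header_order_py lines i = header_order_py_alt lines i
  unfold header_order_py header_order_py_alt
  simp only [List.foldl_cons, List.foldl_nil, List.map_cons, List.map_nil,
    if_append_step, match_step, isort_eq, ded_eq_foldl, gIf_def,
    List.nil_append, List.append_assoc]
  rw [show PySem.Str.lower "Mt. TVA" = "mt. tva" by decide,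
      show PySem.Str.lower "Montant TVA" = "montant tva" by decide,
      show PySem.Str.lower "TVA" = "tva" by decide,
      show PySem.Str.lower "Base HT" = "base ht" by decide,
      show PySem.Str.lower "HT" = "ht" by decide,
      show PySem.Str.lower "Base TTC" = "base ttc" by decide,
      show PySem.Str.lower "TTC" = "ttc" by decide]
  set tl := PySem.Str.lower (PySem.Str.join " " (PySem.List.slice lines (some (max 0 (i - 2))) (some (min (lines.length : Int) (i + 3))))) with htl
  set a1 := PySem.Str.find tl "mt. tva" with ha1
  set a2 := PySem.Str.find tl "montant tva" with ha2
  set a3 := PySem.Str.find tl "tva" with ha3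
  set b1 := PySem.Str.find tl "base ht" with hb1
  set b2 := PySem.Str.find tl "ht" with hb2
  set c1 := PySem.Str.find tl "base ttc" with hc1
  set c2 := PySem.Str.find tl "ttc" with hc2
  have r1 := red3 [] (gIf b1 "HT" ++ (gIf b2 "HT" ++ (gIf c1 "TTC" ++ gIf c2 "TTC"))) a1 a2 a3 "TVA"
  simp only [List.nil_append, List.append_assoc] at r1
  rw [r1]
  have r2 := red2 (gMin ([a1, a2, a3].filter (fun p => p != -1)) "TVA")
      (gIf c1 "TTC" ++ gIf c2 "TTC") b1 b2 "HT"
  simp only [List.append_assoc] at r2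
  rw [r2]
  have r3 := red2 (gMin ([a1, a2, a3].filter (fun p => p != -1)) "TVA" ++
      gMin ([b1, b2].filter (fun p => p != -1)) "HT") [] c1 c2 "TTC"
  simp only [List.append_assoc, List.append_nil] at r3
  rw [r3]
  rw [ded_isort_eq_map_snd _ (nodup_M _ _ _)]
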